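-- pv_equiv track=rewrite | github.com/arch456/LC-Sequence | lc_sequence.py | count_pos_kmer
-- ===== SOURCE A (Python) =====
-- def count_pos_kmer(Seq,k):
--     """
--     Summary line: Counts the number of possible kmers for a sequence, for a specific k value
--
--     Extended description: This function takes k and a sequence Seq as input arguments and determines the number of possible/expected k-mers
--     for a particular k-value
--
--     Parameters:
--     Seq: the input sequence for which the number of k-mers need to be determined
--     k: the input value, ranges from 1 to length of the sequence
--
--     Return:
--     pos_kmers: the number of kmers possible
--     """
--
--     lk_pos = []
--     if k == 1:
--         return 4;
--     else:
--         for i in range(0,len(Seq)-k+1):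
--             lk_pos.append(Seq[i:i+k])
--
--         return len(lk_pos)
-- ===== SOURCE B (Python) =====
-- def count_pos_kmer(Seq, k):
--     # Closed form: the window count is len(Seq)-k+1, clamped at 0 (k==1 keeps A's special case).
--     if k == 1:
--         return 4
--     return max(0, len(Seq) - k + 1)
-- ===== Notes on version B (the rewrite author's own statement) =====
-- stated objective: faster
-- what changed: Replaces the loop that materialises every k-length slice just to count them with the closed form max(0, len(Seq)-k+1), keeping the k==1 special case.
import Mathlib
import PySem

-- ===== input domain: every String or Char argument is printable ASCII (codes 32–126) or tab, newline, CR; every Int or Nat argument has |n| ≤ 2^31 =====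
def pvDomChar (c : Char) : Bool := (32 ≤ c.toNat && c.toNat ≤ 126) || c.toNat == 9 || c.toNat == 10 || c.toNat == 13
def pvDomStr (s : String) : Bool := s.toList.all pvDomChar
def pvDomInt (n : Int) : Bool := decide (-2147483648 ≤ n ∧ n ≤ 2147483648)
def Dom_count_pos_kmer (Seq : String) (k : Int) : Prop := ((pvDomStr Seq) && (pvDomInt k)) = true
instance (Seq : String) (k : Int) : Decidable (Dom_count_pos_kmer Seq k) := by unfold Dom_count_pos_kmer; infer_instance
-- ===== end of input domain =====

-- B replaces A's slice-building loop with the closed form max(0, len(Seq)-k+1); faster (asymptotic).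


-- ===== PORT A =====
def count_pos_kmer (Seq : String) (k : Int) : Int :=
  if k = 1 then 4
  else
    -- the loop appends Seq[i:i+k] for each i of the range; built here as the map over the range
    let lk_pos := (PySem.List.pyRange 0 (PySem.Str.len Seq - k + 1) 1).map
      (fun i => PySem.Str.slice Seq (some i) (some (i + k)))
    PySem.List.len lk_pos

-- ===== PORT B =====
def count_pos_kmer_alt (Seq : String) (k : Int) : Int :=
  if k = 1 then 4 else max 0 (PySem.Str.len Seq - k + 1)

-- ===== PRECONDITION & SPEC =====
def Spec_count_pos_kmer (Seq : String) (k : Int) (out : Int) : Prop := out = count_pos_kmer_alt Seq k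
instance (Seq : String) (k : Int) (out : Int) : Decidable (Spec_count_pos_kmer Seq k out) := by unfold Spec_count_pos_kmer; infer_instance

-- ===== CLAIM (what is proved, stated in full; the proofs are below) =====
def Claim_equal_count_pos_kmer : Prop := ∀ (Seq : String) (k : Int), Dom_count_pos_kmer Seq k → Spec_count_pos_kmer Seq k (count_pos_kmer Seq k)

-- ===== LEMMAS AND PROOFS =====
-- ===== VERDICT (by name: the statement is the Claim_ definition above) =====
theorem count_pos_kmer_spec : Claim_equal_count_pos_kmer := by
  intro Seq k _
  unfold Spec_count_pos_kmer count_pos_kmer count_pos_kmer_alt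
  by_cases h : k = 1
  · simp [h]
  · simp only [h, if_false]
    simp [PySem.List.len, PySem.List.length_pyRange_one]
    omega
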